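-- pv_equiv track=rewrite | github.com/DownrightNifty/giuliano108_macos_crackme_solution | valid.py | flip_byte_order
-- ===== SOURCE A (Python) =====
-- def flip_byte_order(s):
--     bytes_ = []
--     i = 0
--     for _ in range(len(s) // 2):
--         byte = s[i:i+2]
--         bytes_.append(byte)
--         i += 2
--     return "".join(list(reversed(bytes_)))
-- ===== SOURCE B (Python) =====
-- def flip_byte_order(s):
--     n = 2 * (len(s) // 2)
--     r = s[:n][::-1]
--     return "".join(r[i+1] + r[i] for i in range(0, n, 2))
-- ===== Notes on version B (the rewrite author's own statement) =====
-- stated objective: alternative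
-- what changed: Instead of chunking the string into two-char pieces with a moving index and reversing the list of chunks, B reverses the even-length prefix once and then swaps the two characters of each adjacent pair.
import Mathlib
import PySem

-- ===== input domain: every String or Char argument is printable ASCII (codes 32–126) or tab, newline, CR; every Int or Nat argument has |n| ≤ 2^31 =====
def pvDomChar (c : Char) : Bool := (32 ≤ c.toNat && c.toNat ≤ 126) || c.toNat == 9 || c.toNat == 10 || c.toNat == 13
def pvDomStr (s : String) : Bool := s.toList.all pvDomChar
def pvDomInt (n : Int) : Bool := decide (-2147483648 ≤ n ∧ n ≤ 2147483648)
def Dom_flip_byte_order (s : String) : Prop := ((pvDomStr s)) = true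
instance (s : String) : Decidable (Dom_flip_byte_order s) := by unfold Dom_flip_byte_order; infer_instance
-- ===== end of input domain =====

-- B reverses the even-length prefix once and swaps the characters of each adjacent pair
-- (alternative decomposition, same O(n) cost); A chunks into pairs and reverses the chunk list.

-- ===== PORT A =====
def flip_byte_order (s : String) : String :=
  let cs := s.toList
  let st :=
    (PySem.List.pyRange 0 (PySem.Int.floordiv (cs.length : Int) 2) 1).foldl
      (fun (st : List (List Char) × Int) _ =>
        (st.1 ++ [PySem.List.slice cs (some st.2) (some (st.2 + 2))], st.2 + 2))
      ([], 0)
  String.ofList st.1.reverse.flatten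

-- ===== PORT B =====
def flip_byte_order_alt (s : String) : String :=
  let cs := s.toList
  let n : Int := 2 * PySem.Int.floordiv (cs.length : Int) 2
  -- r = s[:n][::-1] ; [::-1] is list reversal (PySem.List.slice?_none_none_neg_one)
  let r := (PySem.List.slice cs none (some n)).reverse
  -- "".join(r[i+1] + r[i] for i in range(0, n, 2)); every index is in range, so pyGet? is some
  String.ofList (((PySem.List.pyRange 0 n 2).map
      (fun i => (PySem.List.pyGet? r (i + 1)).toList ++ (PySem.List.pyGet? r i).toList)).flatten)

-- ===== PRECONDITION & SPEC =====
def Spec_flip_byte_order (s : String) (out : String) : Prop := out = flip_byte_order_alt s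
instance (s : String) (out : String) : Decidable (Spec_flip_byte_order s out) := by unfold Spec_flip_byte_order; infer_instance

-- ===== CLAIM (what is proved, stated in full; the proofs are below) =====
def Claim_equal_flip_byte_order : Prop := ∀ (s : String), Dom_flip_byte_order s → Spec_flip_byte_order s (flip_byte_order s)

-- ===== LEMMAS AND PROOFS =====

/-- Pair chunks of a list: `[a,b,c,d,e] ↦ [[a,b],[c,d]]`. -/
def chunks : List Char → List (List Char)
  | a :: b :: t => [a, b] :: chunks t
  | _ => []

/-- Swap adjacent elements pairwise. -/
def swapAdj : List Char → List Char
  | a :: b :: t => b :: a :: swapAdj t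
  | l => l

theorem pv_floordiv_two (n : Nat) :
    PySem.Int.floordiv (n : Int) 2 = ((n / 2 : Nat) : Int) := by
  unfold PySem.Int.floordiv
  rw [Int.fdiv_eq_ediv]
  omega

theorem pv_foldl_const {α β : Type} (g : β → β) (l : List α) (init : β) :
    l.foldl (fun st _ => g st) init = g^[l.length] init := by
  induction l generalizing init with
  | nil => rfl
  | cons x t ih => simp [List.foldl, ih, Function.iterate_succ_apply]

theorem pv_iter_g (cs : List Char) (m : Nat) :
    ∀ (acc : List (List Char)) (i : Nat),
    (fun (st : List (List Char) × Int) =>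
        (st.1 ++ [PySem.List.slice cs (some st.2) (some (st.2 + 2))], st.2 + 2))^[m] (acc, (i : Int))
    = (acc ++ (List.range m).map (fun k => (cs.drop (i + 2 * k)).take 2),
        ((i + 2 * m : Nat) : Int)) := by
  induction m with
  | zero => simp
  | succ m ih =>
    intro acc i
    rw [Function.iterate_succ_apply]
    have hs : PySem.List.slice cs (some (i : Int)) (some ((i : Int) + 2)) =
        (cs.drop i).take 2 := by
      have h := PySem.List.slice_natCast_add cs i 2
      simpa using h
    have h2 : ((i : Int) + 2) = (((i + 2 : Nat) : Int)) := by push_cast; ring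
    simp only [hs]
    rw [h2, ih]
    rw [List.range_succ_eq_map]
    simp only [List.map_cons, List.map_map, Prod.mk.injEq, List.append_assoc,
      List.singleton_append]
    constructor
    · refine congrArg (acc ++ ·) ?_
      refine congrArg₂ List.cons ?_ ?_
      · have h0 : i + 2 * 0 = i := by omega
        rw [h0]
      · apply List.map_congr_left
        intro k _
        simp only [Function.comp, Nat.succ_eq_add_one]
        have hk : i + 2 * (k + 1) = i + 2 + 2 * k := by omega
        rw [hk]
    · push_cast; ring

theorem pv_range_chunks : ∀ (cs : List Char),
    (List.range (cs.length / 2)).map (fun k => (cs.drop (2 * k)).take 2) = chunks cs := by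
  intro cs
  induction cs using chunks.induct with
  | case1 a b t ih =>
    have hl : (a :: b :: t).length / 2 = t.length / 2 + 1 := by
      simp only [List.length_cons]; omega
    rw [hl, List.range_succ_eq_map]
    simp only [List.map_cons, List.map_map, chunks, List.cons.injEq]
    constructor
    · simp
    · rw [← ih]
      apply List.map_congr_left
      intro k _
      simp only [Function.comp]
      have h2 : 2 * Nat.succ k = 2 * k + 2 := by omega
      rw [h2]
      rfl
  | case2 t h1 =>
    match t, h1 with
    | [], _ => rfl
    | [a], _ => simp [chunks]
    | a :: b :: t, h1 => exact absurd rfl (fun h => h1 a b t h)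

theorem pv_A_eq (s : String) :
    flip_byte_order s = String.ofList (chunks s.toList).reverse.flatten := by
  simp only [flip_byte_order]
  rw [pv_floordiv_two, PySem.List.pyRange_zero_natCast]
  rw [pv_foldl_const
    (fun (st : List (List Char) × Int) =>
        (st.1 ++ [PySem.List.slice s.toList (some st.2) (some (st.2 + 2))], st.2 + 2))]
  rw [show ((([], 0) : List (List Char) × Int)) = (([], ((0:Nat) : Int))) from by norm_num]
  rw [List.length_map, List.length_range]
  rw [pv_iter_g s.toList (s.toList.length / 2) [] 0]
  simp only [List.nil_append]
  congr 1
  rw [← pv_range_chunks s.toList]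
  congr 1
  congr 1
  apply List.map_congr_left
  intro k _
  congr 2
  omega

theorem pv_swapAdj_append : ∀ (u v : List Char), u.length % 2 = 0 →
    swapAdj (u ++ v) = swapAdj u ++ swapAdj v := by
  intro u v
  induction u using chunks.induct with
  | case1 a b t ih =>
    intro h
    have ht : t.length % 2 = 0 := by simp only [List.length_cons] at h; omega
    simp only [List.cons_append, swapAdj]
    rw [ih ht]
  | case2 t h1 =>
    match t, h1 with
    | [], _ => intro _; simp [swapAdj]
    | [a], _ => intro h; simp at h
    | a :: b :: t, h1 => exact absurd rfl (fun h => h1 a b t h)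

theorem pv_rev_swap : ∀ (cs : List Char), cs.length % 2 = 0 →
    swapAdj cs.reverse = (chunks cs).reverse.flatten := by
  intro cs
  induction cs using chunks.induct with
  | case1 a b t ih =>
    intro h
    have ht : t.length % 2 = 0 := by simp only [List.length_cons] at h; omega
    simp only [List.reverse_cons, List.append_assoc]
    rw [pv_swapAdj_append _ _ (by simpa using ht)]
    rw [ih ht]
    simp [chunks, swapAdj]
  | case2 t h1 =>
    match t, h1 with
    | [], _ => intro _; rfl
    | [a], _ => intro h; simp at h
    | a :: b :: t, h1 => exact absurd rfl (fun h => h1 a b t h)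

theorem pv_chunks_take : ∀ (cs : List Char),
    chunks (cs.take (2 * (cs.length / 2))) = chunks cs := by
  intro cs
  induction cs using chunks.induct with
  | case1 a b t ih =>
    have hl : 2 * ((a :: b :: t).length / 2) = 2 * (t.length / 2) + 2 := by
      simp only [List.length_cons]; omega
    rw [hl]
    simp only [List.take_succ_cons, chunks]
    rw [ih]
  | case2 t h1 =>
    match t, h1 with
    | [], _ => rfl
    | [a], _ => simp [chunks]
    | a :: b :: t, h1 => exact absurd rfl (fun h => h1 a b t h)

theorem pv_pyRange_two (m : Nat) :
    PySem.List.pyRange 0 ((2 * m : Nat) : Int) 2 =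
      (List.range m).map (fun k => ((2 * k : Nat) : Int)) := by
  rw [PySem.List.pyRange_of_pos 0 _ (by norm_num)]
  split_ifs with h
  · have hq : (((2 * m : Nat) : Int) - 0 + 2 - 1) / 2 = (m : Int) := by push_cast; omega
    rw [hq]
    simp only [Int.toNat_natCast]
    apply List.map_congr_left
    intro k _
    push_cast; ring
  · have hm : m = 0 := by push_cast at h; omega
    subst hm; rfl

theorem pv_map_swap : ∀ (m : Nat) (r : List Char), r.length = 2 * m →
    ((List.range m).map (fun k => ((r[2 * k + 1]?).toList ++ (r[2 * k]?).toList))).flatten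
      = swapAdj r := by
  intro m
  induction m with
  | zero =>
    intro r hr
    have hnil : r = [] := by cases r <;> simp_all
    subst hnil; rfl
  | succ m ih =>
    intro r hr
    match r with
    | a :: b :: t =>
      rw [List.range_succ_eq_map]
      simp only [List.map_cons, List.map_map, List.flatten_cons]
      have ht : t.length = 2 * m := by simp only [List.length_cons] at hr; omega
      have hmap : ((List.range m).map ((fun k => (((a :: b :: t)[2 * k + 1]?).toList
            ++ ((a :: b :: t)[2 * k]?).toList)) ∘ Nat.succ)) =
          (List.range m).map (fun k => ((t[2 * k + 1]?).toList ++ (t[2 * k]?).toList)) := by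
        apply List.map_congr_left
        intro k _
        simp only [Function.comp]
        have e1 : 2 * Nat.succ k + 1 = (2 * k + 1) + 1 + 1 := by omega
        have e2 : 2 * Nat.succ k = (2 * k) + 1 + 1 := by omega
        rw [e1, e2, List.getElem?_cons_succ, List.getElem?_cons_succ,
            List.getElem?_cons_succ, List.getElem?_cons_succ]
      rw [hmap, ih t ht]
      simp [swapAdj]
    | [] => simp at hr

theorem pv_B_eq (s : String) :
    flip_byte_order_alt s = String.ofList (chunks s.toList).reverse.flatten := by
  simp only [flip_byte_order_alt]
  rw [pv_floordiv_two]
  have h2m : (2 * ((s.toList.length / 2 : Nat) : Int)) =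
      ((2 * (s.toList.length / 2) : Nat) : Int) := by push_cast; ring
  rw [h2m, PySem.List.slice_to_natCast, pv_pyRange_two]
  set m := s.toList.length / 2 with hm
  set r := (s.toList.take (2 * m)).reverse with hrdef
  have hr : r.length = 2 * m := by
    rw [hrdef]; simp only [List.length_reverse, List.length_take]
    omega
  rw [List.map_map]
  have hfun : ((fun i => (PySem.List.pyGet? r (i + 1)).toList
        ++ (PySem.List.pyGet? r i).toList)
        ∘ (fun k : Nat => ((2 * k : Nat) : Int))) =
      fun k : Nat => ((r[2 * k + 1]?).toList ++ (r[2 * k]?).toList) := by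
    funext k
    simp only [Function.comp]
    have h1 : (((2 * k : Nat) : Int) + 1) = (((2 * k + 1 : Nat)) : Int) := by push_cast; ring
    rw [h1, PySem.List.pyGet?_natCast, PySem.List.pyGet?_natCast]
  rw [hfun, pv_map_swap m r hr]
  rw [hrdef, pv_rev_swap _ (by simp only [List.length_take]; omega)]
  rw [show s.toList.take (2 * m) = s.toList.take (2 * (s.toList.length / 2)) from rfl,
      pv_chunks_take]

-- ===== VERDICT (by name: the statement is the Claim_ definition above) =====
theorem flip_byte_order_spec : Claim_equal_flip_byte_order := by
  intro s _
  unfold Spec_flip_byte_order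
  rw [pv_A_eq, pv_B_eq]
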